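-- pv_equiv track=rewrite | github.com/welcome-to-the-sunny-side/libra | waifu/convert/inline.py | _convert_eol_comment
-- ===== SOURCE A (Python) =====
-- def _convert_eol_comment(line: str) -> str:
--     # Convert //... (not in quotes) to /*...*/
--     i = 0
--     in_s = False
--     in_c = False
--     esc = False
--     while i < len(line):
--         ch = line[i]
--         if in_s:
--             if esc:
--                 esc = False
--             elif ch == '\\':
--                 esc = True
--             elif ch == '"':
--                 in_s = False
--             i += 1
--             continue
--         if in_c:
--             if esc:
--                 esc = False
--             elif ch == '\\':
--                 esc = True
--             elif ch == "'":
--                 in_c = False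
--             i += 1
--             continue
--         # not in string/char
--         if ch == '"':
--             in_s = True
--             i += 1
--             continue
--         if ch == "'":
--             in_c = True
--             i += 1
--             continue
--         if ch == '/' and i + 1 < len(line) and line[i + 1] == '/':
--             body = line[i + 2 :]
--             body = body.replace('*/', '* /')  # avoid closing comment accidentally
--             return line[:i] + '/*' + body + '*/'
--         i += 1
--     return line
-- ===== SOURCE B (Python) =====
-- def _convert_eol_comment(line: str) -> str:
--     # Convert first //... (not in quotes) to /*...*/ -- jump-based scanner:
--     # instead of a per-character state machine, jump between interesting
--     # positions with str.find and decide whether a quote is escaped by the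
--     # parity of the backslash run immediately before it.
--     pos = 0
--     while True:
--         jq = line.find('"', pos)
--         ja = line.find("'", pos)
--         jc = line.find('//', pos)
--         js = [j for j in (jq, ja, jc) if j != -1]
--         if not js:
--             return line
--         j = min(js)
--         if j == jc:
--             return line[:j] + '/*' + line[j + 2:].replace('*/', '* /') + '*/'
--         # a quoted literal opens at j: find its unescaped closing quote
--         q = line[j]
--         k = j + 1
--         while True:
--             k = line.find(q, k)
--             if k == -1:
--                 return line  # unterminated literal: no comment can follow
--             b = k - 1
--             while b > j and line[b] == '\\':
--                 b -= 1
--             if (k - 1 - b) % 2 == 0: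
--                 pos = k + 1
--                 break
--             k += 1
-- ===== Notes on version B (the rewrite author's own statement) =====
-- stated objective: faster
-- what changed: Replaces A's per-character state machine (in_s/in_c/esc flags) with a jump-based scanner: str.find locates the next quote or comment marker, and a closing quote is recognised by the parity of the backslash run immediately before it, so no escape state is ever simulated.
import Mathlib
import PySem

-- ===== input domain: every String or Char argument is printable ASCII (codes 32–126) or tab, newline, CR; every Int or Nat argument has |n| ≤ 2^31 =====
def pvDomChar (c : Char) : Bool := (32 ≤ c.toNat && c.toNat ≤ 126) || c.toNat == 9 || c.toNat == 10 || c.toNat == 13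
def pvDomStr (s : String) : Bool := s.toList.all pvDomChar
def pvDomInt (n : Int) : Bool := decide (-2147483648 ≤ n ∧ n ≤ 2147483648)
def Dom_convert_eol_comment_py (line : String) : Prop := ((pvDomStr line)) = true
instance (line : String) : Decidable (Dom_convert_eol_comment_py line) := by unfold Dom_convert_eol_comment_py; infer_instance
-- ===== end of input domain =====

-- B replaces A's per-character state machine (in_s/in_c/esc flags) by a jump-based
-- scanner: str.find locates the next quote or '//', and a closing quote is recognised
-- by the parity of the backslash run immediately before it; same return value.

-- ===== PORT A =====
-- A's while-loop over the index i with state (in_s, in_c, esc); the fuel argument only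
-- makes the recursion structural (fuel = l.length always suffices: i grows each step).
def pvGoA (l : List Char) : Nat → Nat → Bool → Bool → Bool → List Char
  | 0, _, _, _, _ => l
  | fuel+1, i, in_s, in_c, esc =>
    if h : i < l.length then
      let ch := l[i]
      if in_s then
        if esc then pvGoA l fuel (i+1) in_s in_c false
        else if ch = '\\' then pvGoA l fuel (i+1) in_s in_c true
        else if ch = '"' then pvGoA l fuel (i+1) false in_c esc
        else pvGoA l fuel (i+1) in_s in_c esc
      else if in_c then
        if esc then pvGoA l fuel (i+1) in_s in_c false
        else if ch = '\\' then pvGoA l fuel (i+1) in_s in_c true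
        else if ch = '\'' then pvGoA l fuel (i+1) in_s false esc
        else pvGoA l fuel (i+1) in_s in_c esc
      else if ch = '"' then pvGoA l fuel (i+1) true in_c esc
      else if ch = '\'' then pvGoA l fuel (i+1) in_s true esc
      else if ch = '/' ∧ l[i+1]? = some '/' then
        l.take i ++ ('/' :: '*' :: PySem.Chars.replace (l.drop (i+2)) ['*','/'] ['*',' ','/']) ++ ['*','/']
      else pvGoA l fuel (i+1) in_s in_c esc
    else l

def convert_eol_comment_py (line : String) : String :=
  String.ofList (pvGoA line.toList line.toList.length 0 false false false)

-- ===== PORT B =====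
-- line.find(c, i) for a single character c: first index ≥ i holding c (none = -1);
-- exact hand port of CPython's scan for a 1-char needle.
def pvFindCh (l : List Char) (c : Char) (i : Nat) : Option Nat :=
  if h : i < l.length then (if l[i] = c then some i else pvFindCh l c (i+1)) else none
termination_by l.length - i

-- line.find('//', i): first index ≥ i where '/' is followed by another '/'
-- (the two-char needle must fit, exactly as Python's substring search requires).
def pvFindDS (l : List Char) (i : Nat) : Option Nat :=
  if h : i < l.length then
    (if l[i] = '/' ∧ l[i+1]? = some '/' then some i else pvFindDS l (i+1))
  else none
termination_by l.length - i

-- the inner 'while b > j and line[b] == "\\": b -= 1' loop: returns the final b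
def pvRunB (l : List Char) (j b : Nat) : Nat :=
  if h : j < b ∧ l[b]? = some '\\' then pvRunB l j (b-1) else b
termination_by b
decreasing_by omega

-- B's closing-quote loop: repeated find(q, k); a hit closes the literal iff the
-- backslash run just before it (bounded below by the opening quote j) has even length.
-- fuel only makes the recursion structural (l.length suffices: k grows each round).
def pvClose (l : List Char) (q : Char) (j : Nat) : Nat → Nat → Option Nat
  | 0, _ => none
  | fc+1, k =>
    match pvFindCh l q k with
    | none => none
    | some k' =>
      if (k' - 1 - pvRunB l j (k' - 1)) % 2 = 0 then some (k' + 1)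
      else pvClose l q j fc (k' + 1)

-- min over the found candidates (Python's min over the list of non-(-1) results)
def pvOptMin : Option Nat → Option Nat → Option Nat
  | none, b => b
  | some a, none => some a
  | some a, some b => some (min a b)

-- B's outer loop: jump to the nearest of '"', '\'', '//' (fuel as above).
def pvGoNew (l : List Char) : Nat → Nat → List Char
  | 0, _ => l
  | fg+1, pos =>
    match pvOptMin (pvFindCh l '"' pos) (pvOptMin (pvFindCh l '\'' pos) (pvFindDS l pos)) with
    | none => l
    | some j =>
      if some j = pvFindDS l pos then
        l.take j ++ ('/' :: '*' :: PySem.Chars.replace (l.drop (j+2)) ['*','/'] ['*',' ','/']) ++ ['*','/']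
      else
        -- q = line[j] (j is in range here, so getD equals line[j])
        match pvClose l (l.getD j ' ') j l.length (j+1) with
        | none => l
        | some p => pvGoNew l fg p

def convert_eol_comment_py_alt (line : String) : String :=
  String.ofList (pvGoNew line.toList line.toList.length 0)

-- ===== PRECONDITION & SPEC =====
def Spec_convert_eol_comment_py (line : String) (out : String) : Prop := out = convert_eol_comment_py_alt line
instance (line : String) (out : String) : Decidable (Spec_convert_eol_comment_py line out) := by unfold Spec_convert_eol_comment_py; infer_instance

-- ===== CLAIM (what is proved, stated in full; the proofs are below) =====
def Claim_equal_convert_eol_comment_py : Prop := ∀ (line : String), Dom_convert_eol_comment_py line → Spec_convert_eol_comment_py line (convert_eol_comment_py line)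

-- ===== LEMMAS AND PROOFS =====

-- proof-side intermediate: a char-by-char quote skipper and the flat outer loop built on it
def pvSkipQ (l : List Char) (q : Char) : Nat → Nat → Nat
  | 0, i => i
  | fuel+1, i =>
    if h : i < l.length then
      if l[i] = '\\' then pvSkipQ l q fuel (i+2)
      else if l[i] = q then i+1
      else pvSkipQ l q fuel (i+1)
    else i

def pvGoB (l : List Char) : Nat → Nat → List Char
  | 0, _ => l
  | fuel+1, i =>
    if h : i < l.length then
      let ch := l[i]
      if ch = '"' ∨ ch = '\'' then pvGoB l fuel (pvSkipQ l ch l.length (i+1))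
      else if ch = '/' ∧ l[i+1]? = some '/' then
        l.take i ++ ('/' :: '*' :: PySem.Chars.replace (l.drop (i+2)) ['*','/'] ['*',' ','/']) ++ ['*','/']
      else pvGoB l fuel (i+1)
    else l

theorem pvGoA_stop (l : List Char) (fa i : Nat) (a b c : Bool) (h : ¬ i < l.length) :
    pvGoA l fa i a b c = l := by cases fa <;> simp [pvGoA, h]

theorem pvGoB_stop (l : List Char) (fb i : Nat) (h : ¬ i < l.length) :
    pvGoB l fb i = l := by cases fb <;> simp [pvGoB, h]

theorem pvSkipQ_stop (l : List Char) (q : Char) (fs i : Nat) (h : ¬ i < l.length) :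
    pvSkipQ l q fs i = i := by cases fs <;> simp [pvSkipQ, h]

-- A = old flat scanner (invariants for the three scanner states)
theorem pv_key (l : List Char) : ∀ (n fa fb i : Nat),
    l.length - i ≤ n → l.length - i ≤ fa → l.length - i ≤ fb →
    (pvGoA l fa i false false false = pvGoB l fb i) ∧
    (∀ fs, l.length - i ≤ fs → pvGoA l fa i true false false = pvGoB l fb (pvSkipQ l '"' fs i)) ∧
    (∀ fs, l.length - i ≤ fs → pvGoA l fa i false true false = pvGoB l fb (pvSkipQ l '\'' fs i)) := by
  intro n
  induction n with
  | zero =>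
    intro fa fb i hn hfa hfb
    have h : ¬ i < l.length := by omega
    refine ⟨?_, fun fs _ => ?_, fun fs _ => ?_⟩ <;>
      simp [pvGoA_stop, pvGoB_stop, pvSkipQ_stop, h]
  | succ n ih =>
    intro fa fb i hn hfa hfb
    by_cases h : i < l.length
    case neg =>
      refine ⟨?_, fun fs _ => ?_, fun fs _ => ?_⟩ <;>
        simp [pvGoA_stop, pvGoB_stop, pvSkipQ_stop, h]
    case pos =>
    obtain ⟨fa, rfl⟩ : ∃ k, fa = k + 1 := ⟨fa - 1, by omega⟩
    obtain ⟨fb, rfl⟩ : ∃ k, fb = k + 1 := ⟨fb - 1, by omega⟩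
    refine ⟨?_, ?_, ?_⟩
    · -- outside quotes
      simp only [pvGoA, pvGoB, h, dif_pos, Bool.false_eq_true, ite_false]
      by_cases hq : l[i] = '"'
      · simp only [hq, ite_true, true_or]
        exact ((ih fa fb (i+1) (by omega) (by omega) (by omega)).2.1) l.length (by omega)
      · by_cases hq' : l[i] = '\''
        · simp only [hq', ite_true, or_true]
          exact ((ih fa fb (i+1) (by omega) (by omega) (by omega)).2.2) l.length (by omega)
        · simp only [hq, hq', or_self, ite_false]
          by_cases hs : l[i] = '/' ∧ l[i+1]? = some '/'
          · rw [if_pos hs, if_pos hs]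
          · rw [if_neg hs, if_neg hs]
            exact (ih fa fb (i+1) (by omega) (by omega) (by omega)).1
    · -- inside a '"' literal, esc = false
      intro fs hfs
      obtain ⟨fs, rfl⟩ : ∃ k, fs = k + 1 := ⟨fs - 1, by omega⟩
      simp only [pvGoA, pvSkipQ, h, dif_pos, ite_true, Bool.false_eq_true, ite_false]
      by_cases hb : l[i] = '\\'
      · simp only [hb, ite_true]
        by_cases h2 : i + 1 < l.length
        · obtain ⟨fa, rfl⟩ : ∃ k, fa = k + 1 := ⟨fa - 1, by omega⟩
          simp only [pvGoA, h2, dif_pos, ite_true]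
          exact ((ih fa (fb+1) (i+2) (by omega) (by omega) (by omega)).2.1) fs (by omega)
        · have h3 : ¬ i + 2 < l.length := by omega
          rw [pvGoA_stop l fa (i+1) _ _ _ h2, pvSkipQ_stop l '"' fs (i+2) h3,
              pvGoB_stop l (fb+1) (i+2) h3]
      · simp only [hb, ite_false]
        by_cases hq : l[i] = '"'
        · simp only [hq, ite_true]
          exact (ih fa (fb+1) (i+1) (by omega) (by omega) (by omega)).1
        · simp only [hq, ite_false]
          exact ((ih fa (fb+1) (i+1) (by omega) (by omega) (by omega)).2.1) fs (by omega)
    · -- inside a '\'' literal, esc = false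
      intro fs hfs
      obtain ⟨fs, rfl⟩ : ∃ k, fs = k + 1 := ⟨fs - 1, by omega⟩
      simp only [pvGoA, pvSkipQ, h, dif_pos, ite_true, Bool.false_eq_true, ite_false]
      by_cases hb : l[i] = '\\'
      · simp only [hb, ite_true]
        by_cases h2 : i + 1 < l.length
        · obtain ⟨fa, rfl⟩ : ∃ k, fa = k + 1 := ⟨fa - 1, by omega⟩
          simp only [pvGoA, h2, dif_pos, ite_true]
          exact ((ih fa (fb+1) (i+2) (by omega) (by omega) (by omega)).2.2) fs (by omega)
        · have h3 : ¬ i + 2 < l.length := by omega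
          rw [pvGoA_stop l fa (i+1) _ _ _ h2, pvSkipQ_stop l '\'' fs (i+2) h3,
              pvGoB_stop l (fb+1) (i+2) h3]
      · simp only [hb, ite_false]
        by_cases hq : l[i] = '\''
        · simp only [hq, ite_true]
          exact (ih fa (fb+1) (i+1) (by omega) (by omega) (by omega)).1
        · simp only [hq, ite_false]
          exact ((ih fa (fb+1) (i+1) (by omega) (by omega) (by omega)).2.2) fs (by omega)

-- basic facts about the find helpers
theorem pvFindCh_stop (l : List Char) (c : Char) (i : Nat) (h : ¬ i < l.length) :
    pvFindCh l c i = none := by rw [pvFindCh]; simp [h]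

theorem pvFindCh_self (l : List Char) (c : Char) (i : Nat) (h : i < l.length)
    (hc : l[i] = c) : pvFindCh l c i = some i := by rw [pvFindCh]; simp [h, hc]

theorem pvFindCh_step (l : List Char) (c : Char) (i : Nat) (h : i < l.length)
    (hc : l[i] ≠ c) : pvFindCh l c i = pvFindCh l c (i+1) := by rw [pvFindCh]; simp [h, hc]

theorem pvFindDS_stop (l : List Char) (i : Nat) (h : ¬ i < l.length) :
    pvFindDS l i = none := by rw [pvFindDS]; simp [h]

theorem pvFindDS_self (l : List Char) (i : Nat) (h : i < l.length)
    (hc : l[i] = '/' ∧ l[i+1]? = some '/') : pvFindDS l i = some i := by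
  rw [pvFindDS]; simp [h, hc]

theorem pvFindDS_step (l : List Char) (i : Nat) (h : i < l.length)
    (hc : ¬ (l[i] = '/' ∧ l[i+1]? = some '/')) : pvFindDS l i = pvFindDS l (i+1) := by
  rw [pvFindDS]; simp only [h, dif_pos]; rw [if_neg hc]

theorem pvFindCh_bound (l : List Char) (c : Char) : ∀ (n i k : Nat), l.length - i ≤ n →
    pvFindCh l c i = some k → i ≤ k ∧ k < l.length := by
  intro n
  induction n with
  | zero =>
    intro i k hn hf
    have h : ¬ i < l.length := by omega
    rw [pvFindCh_stop l c i h] at hf; exact absurd hf (by simp)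
  | succ n ih =>
    intro i k hn hf
    by_cases h : i < l.length
    · by_cases hc : l[i] = c
      · rw [pvFindCh_self l c i h hc] at hf
        cases hf; omega
      · rw [pvFindCh_step l c i h hc] at hf
        have := ih (i+1) k (by omega) hf
        omega
    · rw [pvFindCh_stop l c i h] at hf; exact absurd hf (by simp)

theorem pvFindDS_bound (l : List Char) : ∀ (n i k : Nat), l.length - i ≤ n →
    pvFindDS l i = some k → i ≤ k ∧ k < l.length := by
  intro n
  induction n with
  | zero =>
    intro i k hn hf
    have h : ¬ i < l.length := by omega
    rw [pvFindDS_stop l i h] at hf; exact absurd hf (by simp)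
  | succ n ih =>
    intro i k hn hf
    by_cases h : i < l.length
    · by_cases hc : l[i] = '/' ∧ l[i+1]? = some '/'
      · rw [pvFindDS_self l i h hc] at hf
        cases hf; omega
      · rw [pvFindDS_step l i h hc] at hf
        have := ih (i+1) k (by omega) hf
        omega
    · rw [pvFindDS_stop l i h] at hf; exact absurd hf (by simp)

theorem pvRunB_stop (l : List Char) (j b : Nat) (h : ¬ (j < b ∧ l[b]? = some '\\')) :
    pvRunB l j b = b := by rw [pvRunB]; simp [h]

theorem pvRunB_step (l : List Char) (j b : Nat) (h : j < b ∧ l[b]? = some '\\') :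
    pvRunB l j b = pvRunB l j (b-1) := by rw [pvRunB]; simp [h]

theorem pvRunB_le (l : List Char) (j : Nat) : ∀ b, pvRunB l j b ≤ b := by
  intro b
  induction b using Nat.strong_induction_on with
  | _ b ih =>
    by_cases h : j < b ∧ l[b]? = some '\\'
    · rw [pvRunB_step l j b h]
      have := ih (b-1) (by omega)
      omega
    · rw [pvRunB_stop l j b h]

theorem pvClose_bound (l : List Char) (q : Char) (j : Nat) : ∀ (fc k p : Nat),
    pvClose l q j fc k = some p → k < p := by
  intro fc
  induction fc with
  | zero => intro k p hp; exact absurd hp (by simp [pvClose])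
  | succ fc ih =>
    intro k p hp
    cases hf : pvFindCh l q k with
    | none =>
      simp only [pvClose, hf] at hp
      exact absurd hp (by simp)
    | some k' =>
      have hb := pvFindCh_bound l q l.length k k' (by omega) hf
      by_cases he : (k' - 1 - pvRunB l j (k' - 1)) % 2 = 0
      · simp only [pvClose, hf, he, ite_true, Option.some.injEq] at hp
        omega
      · simp only [pvClose, hf, he, ite_false] at hp
        have := ih (k'+1) p hp
        omega

-- the jump-based closing-quote search agrees with the char-by-char skipper:
-- from any position k (inside the literal opened at j) whose preceding backslash
-- run is even, pvClose returns exactly pvSkipQ's exit, or none when pvSkipQ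
-- overruns the line (unterminated literal).
theorem pv_close_skip (l : List Char) (q : Char) (j : Nat) (hq : q ≠ '\\') :
    ∀ (n k fs fc : Nat), j < k → l.length - k ≤ n → l.length - k ≤ fs → l.length - k ≤ fc →
    (k - 1 - pvRunB l j (k - 1)) % 2 = 0 →
    (match pvClose l q j fc k with
     | some p => pvSkipQ l q fs k = p
     | none => l.length ≤ pvSkipQ l q fs k) := by
  intro n
  induction n with
  | zero =>
    intro k fs fc hj hn hfs hfc hev
    have h : ¬ k < l.length := by omega
    rw [pvSkipQ_stop l q fs k h]
    have hf : pvFindCh l q k = none := pvFindCh_stop l q k h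
    cases fc with
    | zero => simp [pvClose]; omega
    | succ fc => simp [pvClose, hf]; omega
  | succ n ih =>
    intro k fs fc hj hn hfs hfc hev
    by_cases h : k < l.length
    case neg =>
      rw [pvSkipQ_stop l q fs k h]
      have hf : pvFindCh l q k = none := pvFindCh_stop l q k h
      cases fc with
      | zero => simp [pvClose]; omega
      | succ fc => simp [pvClose, hf]; omega
    case pos =>
    obtain ⟨fs, rfl⟩ : ∃ m, fs = m + 1 := ⟨fs - 1, by omega⟩
    obtain ⟨fc, rfl⟩ : ∃ m, fc = m + 1 := ⟨fc - 1, by omega⟩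
    by_cases hqk : l[k] = q
    · -- closing quote right here
      have hskip : pvSkipQ l q (fs+1) k = k + 1 := by
        have hnb : l[k] ≠ '\\' := by rw [hqk]; exact hq
        simp [pvSkipQ, h, hqk, hq]
      have hf : pvFindCh l q k = some k := pvFindCh_self l q k h hqk
      simp only [pvClose, hf, hev, ite_true]
      exact hskip
    · by_cases hbk : l[k] = '\\'
      · -- backslash: the skipper jumps two
        have hskip : pvSkipQ l q (fs+1) k = pvSkipQ l q fs (k+2) := by
          simp [pvSkipQ, h, hbk]
        rw [hskip]
        by_cases hk2 : l[k+1]? = some q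
        · -- escaped quote: pvClose finds it, parity is odd, it moves on
          have h2 : k + 1 < l.length := by
            by_contra hcon
            rw [List.getElem?_eq_none (by omega)] at hk2; exact absurd hk2 (by simp)
          have hq2 : l[k+1] = q := by
            rw [List.getElem?_eq_getElem h2] at hk2; exact Option.some.inj hk2
          have hf : pvFindCh l q k = some (k+1) := by
            rw [pvFindCh_step l q k h hqk, pvFindCh_self l q (k+1) h2 hq2]
          have hrk : pvRunB l j k = pvRunB l j (k-1) := by
            apply pvRunB_step
            exact ⟨hj, by rw [List.getElem?_eq_getElem h]; exact congrArg some hbk⟩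
          have hle := pvRunB_le l j (k-1)
          have hodd : ¬ ((k + 1 - 1 - pvRunB l j (k + 1 - 1)) % 2 = 0) := by
            simp only [Nat.add_sub_cancel, hrk]
            omega
          simp only [pvClose, hf, hodd, ite_false]
          -- continue from k+2, whose preceding run is empty (a quote is not a backslash)
          have hev2 : (k + 2 - 1 - pvRunB l j (k + 2 - 1)) % 2 = 0 := by
            have : pvRunB l j (k+1) = k+1 := by
              apply pvRunB_stop
              rintro ⟨-, hcon⟩
              rw [List.getElem?_eq_getElem h2] at hcon
              exact hq (hq2 ▸ Option.some.inj hcon)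
            simp [this]
          exact ih (k+2) fs fc (by omega) (by omega) (by omega) (by omega) hev2
        · -- backslash escaping a non-quote: pvClose's search passes straight over both
          have hfeq : pvFindCh l q k = pvFindCh l q (k+2) := by
            rw [pvFindCh_step l q k h hqk]
            by_cases h2 : k + 1 < l.length
            · have : l[k+1] ≠ q := by
                intro hcon
                rw [List.getElem?_eq_getElem h2] at hk2
                exact hk2 (congrArg some hcon)
              rw [pvFindCh_step l q (k+1) h2 this]
            · rw [pvFindCh_stop l q (k+1) h2, pvFindCh_stop l q (k+2) (by omega)]
          have hceq : pvClose l q j (fc+1) k = pvClose l q j (fc+1) (k+2) := by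
            simp only [pvClose, hfeq]
          rw [hceq]
          have hev2 : (k + 2 - 1 - pvRunB l j (k + 2 - 1)) % 2 = 0 := by
            by_cases hb2 : l[k+1]? = some '\\'
            · have hr1 : pvRunB l j (k+1) = pvRunB l j k := by
                rw [pvRunB_step l j (k+1) ⟨by omega, hb2⟩]; simp
              have hrk : pvRunB l j k = pvRunB l j (k-1) := by
                apply pvRunB_step
                exact ⟨hj, by rw [List.getElem?_eq_getElem h]; exact congrArg some hbk⟩
              have hle := pvRunB_le l j (k-1)
              have e : k + 2 - 1 = k + 1 := by omega
              rw [e, hr1, hrk]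
              omega
            · have : pvRunB l j (k+1) = k+1 := pvRunB_stop l j (k+1) (by tauto)
              have e : k + 2 - 1 = k + 1 := by omega
              rw [e, this]
              omega
          exact ih (k+2) fs (fc+1) (by omega) (by omega) (by omega) (by omega) hev2
      · -- ordinary character: both advance by one
        have hskip : pvSkipQ l q (fs+1) k = pvSkipQ l q fs (k+1) := by
          simp [pvSkipQ, h, hbk, hqk]
        rw [hskip]
        have hfeq : pvFindCh l q k = pvFindCh l q (k+1) := pvFindCh_step l q k h hqk
        have hceq : pvClose l q j (fc+1) k = pvClose l q j (fc+1) (k+1) := by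
          simp only [pvClose, hfeq]
        rw [hceq]
        have hev2 : (k + 1 - 1 - pvRunB l j (k + 1 - 1)) % 2 = 0 := by
          have : pvRunB l j k = k := by
            apply pvRunB_stop
            rintro ⟨-, hcon⟩
            rw [List.getElem?_eq_getElem h] at hcon
            exact hbk (Option.some.inj hcon)
          simp [this]
        exact ih (k+1) fs (fc+1) (by omega) (by omega) (by omega) (by omega) hev2

-- the flat outer loop equals B's jump-based outer loop
theorem pv_outer (l : List Char) : ∀ (n pos fb fg : Nat),
    l.length - pos ≤ n → l.length - pos ≤ fb → l.length - pos ≤ fg →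
    pvGoB l fb pos = pvGoNew l fg pos := by
  intro n
  induction n with
  | zero =>
    intro pos fb fg hn hfb hfg
    have h : ¬ pos < l.length := by omega
    rw [pvGoB_stop l fb pos h]
    cases fg with
    | zero => simp [pvGoNew]
    | succ fg =>
      simp [pvGoNew, pvFindCh_stop l _ pos h, pvFindDS_stop l pos h, pvOptMin]
  | succ n ih =>
    intro pos fb fg hn hfb hfg
    by_cases h : pos < l.length
    case neg =>
      rw [pvGoB_stop l fb pos h]
      cases fg with
      | zero => simp [pvGoNew]
      | succ fg =>
        simp [pvGoNew, pvFindCh_stop l _ pos h, pvFindDS_stop l pos h, pvOptMin]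
    case pos =>
    obtain ⟨fb, rfl⟩ : ∃ m, fb = m + 1 := ⟨fb - 1, by omega⟩
    obtain ⟨fg, rfl⟩ : ∃ m, fg = m + 1 := ⟨fg - 1, by omega⟩
    by_cases hq : l[pos] = '"'
    · -- a double-quoted literal opens here
      have hja : ∀ x, pvFindCh l '\'' pos = some x → pos + 1 ≤ x := by
        intro x hx
        rw [pvFindCh_step l '\'' pos h (by simp [hq])] at hx
        exact (pvFindCh_bound l '\'' l.length (pos+1) x (by omega) hx).1
      have hjc : ∀ x, pvFindDS l pos = some x → pos + 1 ≤ x := by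
        intro x hx
        rw [pvFindDS_step l pos h (by simp [hq])] at hx
        exact (pvFindDS_bound l l.length (pos+1) x (by omega) hx).1
      have hjq : pvFindCh l '"' pos = some pos := pvFindCh_self l '"' pos h hq
      have hmin : pvOptMin (pvFindCh l '"' pos)
          (pvOptMin (pvFindCh l '\'' pos) (pvFindDS l pos)) = some pos := by
        rw [hjq]
        cases hca : pvFindCh l '\'' pos with
        | none =>
          cases hcc : pvFindDS l pos with
          | none => simp [pvOptMin]
          | some x => have := hjc x hcc; simp [pvOptMin]; omega
        | some y =>
          have hy := hja y hca
          cases hcc : pvFindDS l pos with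
          | none => simp [pvOptMin]; omega
          | some x => have := hjc x hcc; simp [pvOptMin]; omega
      have hne : ¬ (some pos = pvFindDS l pos) := by
        intro hcon
        have := hjc pos hcon.symm
        omega
      have hget : l.getD pos ' ' = '"' := by
        rw [List.getD_eq_getElem?_getD, List.getElem?_eq_getElem h, hq]; rfl
      simp only [pvGoNew, hmin, hne, ite_false, hget]
      have hclose := pv_close_skip l '"' pos (by decide) l.length (pos+1) l.length l.length
        (by omega) (by omega) (by omega) (by omega)
        (by rw [Nat.add_sub_cancel, pvRunB_stop l pos pos (by omega)]; simp)
      have hgob : pvGoB l (fb+1) pos = pvGoB l fb (pvSkipQ l '"' l.length (pos+1)) := by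
        simp [pvGoB, h, hq]
      rw [hgob]
      cases hc : pvClose l '"' pos l.length (pos+1) with
      | none =>
        rw [hc] at hclose
        simp only at hclose
        rw [pvGoB_stop l fb _ (by omega)]
      | some p =>
        rw [hc] at hclose
        simp only at hclose
        rw [hclose]
        have hp := pvClose_bound l '"' pos l.length (pos+1) p hc
        exact ih p fb fg (by omega) (by omega) (by omega)
    · by_cases hq' : l[pos] = '\''
      · -- a single-quoted literal opens here
        have hjq : ∀ x, pvFindCh l '"' pos = some x → pos + 1 ≤ x := by
          intro x hx
          rw [pvFindCh_step l '"' pos h (by simp [hq'])] at hx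
          exact (pvFindCh_bound l '"' l.length (pos+1) x (by omega) hx).1
        have hjc : ∀ x, pvFindDS l pos = some x → pos + 1 ≤ x := by
          intro x hx
          rw [pvFindDS_step l pos h (by simp [hq'])] at hx
          exact (pvFindDS_bound l l.length (pos+1) x (by omega) hx).1
        have hja : pvFindCh l '\'' pos = some pos := pvFindCh_self l '\'' pos h hq'
        have hmin : pvOptMin (pvFindCh l '"' pos)
            (pvOptMin (pvFindCh l '\'' pos) (pvFindDS l pos)) = some pos := by
          rw [hja]
          cases hca : pvFindCh l '"' pos with
          | none =>
            cases hcc : pvFindDS l pos with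
            | none => simp [pvOptMin]
            | some x => have := hjc x hcc; simp [pvOptMin]; omega
          | some y =>
            have hy := hjq y hca
            cases hcc : pvFindDS l pos with
            | none => simp [pvOptMin]; omega
            | some x => have := hjc x hcc; simp [pvOptMin]; omega
        have hne : ¬ (some pos = pvFindDS l pos) := by
          intro hcon
          have := hjc pos hcon.symm
          omega
        have hget : l.getD pos ' ' = '\'' := by
          rw [List.getD_eq_getElem?_getD, List.getElem?_eq_getElem h, hq']; rfl
        simp only [pvGoNew, hmin, hne, ite_false, hget]
        have hclose := pv_close_skip l '\'' pos (by decide) l.length (pos+1) l.length l.length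
          (by omega) (by omega) (by omega) (by omega)
          (by rw [Nat.add_sub_cancel, pvRunB_stop l pos pos (by omega)]; simp)
        have hgob : pvGoB l (fb+1) pos = pvGoB l fb (pvSkipQ l '\'' l.length (pos+1)) := by
          simp [pvGoB, h, hq']
        rw [hgob]
        cases hc : pvClose l '\'' pos l.length (pos+1) with
        | none =>
          rw [hc] at hclose
          simp only at hclose
          rw [pvGoB_stop l fb _ (by omega)]
        | some p =>
          rw [hc] at hclose
          simp only at hclose
          rw [hclose]
          have hp := pvClose_bound l '\'' pos l.length (pos+1) p hc
          exact ih p fb fg (by omega) (by omega) (by omega)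
      · by_cases hs : l[pos] = '/' ∧ l[pos+1]? = some '/'
        · -- the comment starts here: both return the rewritten line
          have hjc : pvFindDS l pos = some pos := pvFindDS_self l pos h hs
          have hjq : ∀ x, pvFindCh l '"' pos = some x → pos + 1 ≤ x := by
            intro x hx
            rw [pvFindCh_step l '"' pos h (by simp [hs.1])] at hx
            exact (pvFindCh_bound l '"' l.length (pos+1) x (by omega) hx).1
          have hja : ∀ x, pvFindCh l '\'' pos = some x → pos + 1 ≤ x := by
            intro x hx
            rw [pvFindCh_step l '\'' pos h (by simp [hs.1])] at hx
            exact (pvFindCh_bound l '\'' l.length (pos+1) x (by omega) hx).1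
          have hmin : pvOptMin (pvFindCh l '"' pos)
              (pvOptMin (pvFindCh l '\'' pos) (some pos)) = some pos := by
            cases hca : pvFindCh l '"' pos with
            | none =>
              cases hcb : pvFindCh l '\'' pos with
              | none => simp [pvOptMin]
              | some y => have := hja y hcb; simp [pvOptMin]; omega
            | some x =>
              have hx := hjq x hca
              cases hcb : pvFindCh l '\'' pos with
              | none => simp [pvOptMin]; omega
              | some y => have := hja y hcb; simp [pvOptMin]; omega
          have hgob : pvGoB l (fb+1) pos =
              l.take pos ++ ('/' :: '*' :: PySem.Chars.replace (l.drop (pos+2)) ['*','/'] ['*',' ','/']) ++ ['*','/'] := by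
            simp [pvGoB, h, hs]
          rw [hgob]
          simp [pvGoNew, hjc, hmin]
        · -- nothing interesting at pos: all three searches step to pos+1
          have hgob : pvGoB l (fb+1) pos = pvGoB l fb (pos+1) := by
            simp [pvGoB, h, hq, hq', hs]
          have hnew : pvGoNew l (fg+1) pos = pvGoNew l (fg+1) (pos+1) := by
            have e1 : pvFindCh l '"' pos = pvFindCh l '"' (pos+1) :=
              pvFindCh_step l '"' pos h hq
            have e2 : pvFindCh l '\'' pos = pvFindCh l '\'' (pos+1) :=
              pvFindCh_step l '\'' pos h hq'
            have e3 : pvFindDS l pos = pvFindDS l (pos+1) := pvFindDS_step l pos h hs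
            simp only [pvGoNew, e1, e2, e3]
          rw [hgob, hnew]
          exact ih (pos+1) fb (fg+1) (by omega) (by omega) (by omega)

-- ===== VERDICT (by name: the statement is the Claim_ definition above) =====
theorem convert_eol_comment_py_spec : Claim_equal_convert_eol_comment_py := by
  intro line _
  unfold Spec_convert_eol_comment_py convert_eol_comment_py convert_eol_comment_py_alt
  apply congrArg String.ofList
  have h1 := (pv_key line.toList line.toList.length line.toList.length line.toList.length 0
    (by omega) (by omega) (by omega)).1
  have h2 := pv_outer line.toList line.toList.length 0 line.toList.length line.toList.length
    (by omega) (by omega) (by omega)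
  exact h1.trans h2
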